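-- pv_equiv track=rewrite | github.com/Saenn/tech-td | helper/stat_generator.py | _count_alphabet
-- ===== SOURCE A (Python) =====
-- def _count_alphabet(data: str) -> dict:
--     mapper = {}
--     for _chr in data:
--
--         # check if a character is an alphabet
--         if not _chr.isalpha(): continue
--
--         if _chr in mapper:
--             mapper[_chr] += 1
--         else: mapper[_chr] = 1
--
--     mapper = dict(sorted(mapper.items()))
--     return mapper
-- ===== SOURCE B (Python) =====
-- def _count_alphabet(data: str) -> dict:
--     # sort the alphabetic characters first, then count each run of equal
--     # characters in one scan; keys are inserted already in sorted order.
--     rest = sorted(filter(str.isalpha, data))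
--     result = {}
--     while rest:
--         c = rest[0]
--         n = 1
--         while n < len(rest) and rest[n] == c:
--             n += 1
--         result[c] = n
--         rest = rest[n:]
--     return result
-- ===== Notes on version B (the rewrite author's own statement) =====
-- stated objective: alternative
-- what changed: B sorts the alphabetic characters first and counts each run of equal characters in a single scan (sort-then-group), instead of A's hash-count-then-sort of the dict items.
import Mathlib
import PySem

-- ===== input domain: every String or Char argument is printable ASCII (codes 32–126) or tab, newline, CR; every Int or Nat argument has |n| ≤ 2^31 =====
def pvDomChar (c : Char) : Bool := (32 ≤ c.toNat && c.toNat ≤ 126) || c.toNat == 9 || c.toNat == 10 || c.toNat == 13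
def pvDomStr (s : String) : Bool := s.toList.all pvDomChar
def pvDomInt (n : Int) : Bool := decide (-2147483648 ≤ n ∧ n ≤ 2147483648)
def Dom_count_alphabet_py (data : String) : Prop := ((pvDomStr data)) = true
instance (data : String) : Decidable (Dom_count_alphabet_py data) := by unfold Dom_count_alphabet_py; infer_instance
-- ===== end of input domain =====

-- B sorts the alphabetic characters and counts runs in one scan (sort-then-group)
-- instead of A's hash-count-then-sort; an alternative algorithm, not claimed faster.


-- ===== PORT A =====
-- counting dict over the alphabetic characters, then sorted(mapper.items())
def count_alphabet_py (data : String) : List (String × Int) :=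
  let mapper := data.toList.foldl (fun d c =>
    if PySem.Chars.strIsalpha [c] then
      let k := String.ofList [c]
      if d.contains k then d.insert k (d.getD k 0 + 1) else d.insert k 1
    else d) PySem.Dict.empty
  PySem.List.sorted2 mapper.items Prod.fst Prod.snd

-- ===== PORT B =====
-- count the leading run of equal characters, emit it, recurse on the remainder
def pvGroup : List Char → List (String × Int)
  | [] => []
  | c :: rest =>
    (String.ofList [c], (1 + ((rest.takeWhile (fun x => x == c)).length : Int)))
      :: pvGroup (rest.dropWhile (fun x => x == c))
termination_by l => l.length
decreasing_by
  simp only [List.length_cons]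
  exact Nat.lt_succ_of_le (rest.dropWhile_sublist _).length_le

def count_alphabet_py_alt (data : String) : List (String × Int) :=
  pvGroup (PySem.List.sorted (data.toList.filter (fun c => PySem.Chars.strIsalpha [c])) (fun c => c))

-- ===== PRECONDITION & SPEC =====
def Spec_count_alphabet_py (data : String) (out : List (String × Int)) : Prop := out = count_alphabet_py_alt data
instance (data : String) (out : List (String × Int)) : Decidable (Spec_count_alphabet_py data out) := by unfold Spec_count_alphabet_py; infer_instance

-- ===== CLAIM (what is proved, stated in full; the proofs are below) =====
def Claim_equal_count_alphabet_py : Prop := ∀ (data : String), Dom_count_alphabet_py data → Spec_count_alphabet_py data (count_alphabet_py data)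

-- ===== LEMMAS AND PROOFS =====

-- one-character strings compare like their characters
lemma pvMkLt {a b : Char} (h : a < b) : String.ofList [a] < String.ofList [b] := by
  rw [String.lt_iff_toList_lt]
  simp only [String.toList_ofList]
  exact List.Lex.rel h

lemma pvMkInj : Function.Injective (fun c : Char => String.ofList [c]) := by
  intro a b h
  have := congrArg String.toList h
  simpa using this

-- Python's sorted() on (String × Int) pairs: any strictly fst-increasing rearrangement is the result
lemma pvSorted2Eq (xs ys : List (String × Int)) (hp : ys.Perm xs)
    (h : ys.Pairwise (fun a b => a.1 < b.1)) :
    PySem.List.sorted2 xs Prod.fst Prod.snd = ys := by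
  have hkey : PySem.List.sorted2 xs Prod.fst Prod.snd
      = PySem.List.sorted xs (fun p => toLex (p.1, p.2)) := by
    show List.foldl _ [] xs = List.foldl _ [] xs
    have hc : (fun (a b : String × Int) =>
        (decide (a.1 < b.1) || (!decide (b.1 < a.1) && decide (a.2 < b.2))))
        = fun a b => decide (toLex (a.1, a.2) < toLex (b.1, b.2)) := by
      funext a b
      rcases lt_trichotomy a.1 b.1 with hab | hab | hab
      · simp [Prod.Lex.lt_iff, hab]
      · simp [Prod.Lex.lt_iff, hab]
      · simp [Prod.Lex.lt_iff, hab, not_lt_of_gt hab, ne_of_gt hab]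
    simp only [Bool.false_eq_true, if_false]
    rw [hc]
  rw [hkey]
  exact PySem.List.sorted_eq_of_perm_of_pairwise_lt _ _ _ hp
    (h.imp (fun hab => Prod.Lex.lt_iff.mpr (Or.inl hab)))

-- Set.ofList plumbing
lemma pvFoldlAddFixed {α : Type} [BEq α] (t acc : List α)
    (h : ∀ x ∈ t, acc.contains x = true) : t.foldl PySem.Set.add acc = acc := by
  induction t with
  | nil => rfl
  | cons x t ih =>
    have hx : PySem.Set.add acc x = acc := by
      simp [PySem.Set.add, PySem.Set.contains, h x (by simp)]
    simp only [List.foldl_cons, hx]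
    exact ih (fun y hy => h y (by simp [hy]))

lemma pvFoldlAddCons {α : Type} [BEq α] [LawfulBEq α] (d : List α) (c : α) (s : List α)
    (hc : c ∉ d) : d.foldl PySem.Set.add (c :: s) = c :: d.foldl PySem.Set.add s := by
  induction d generalizing s with
  | nil => rfl
  | cons x d ih =>
    have hxc : x ≠ c := fun h => hc (by simp [h])
    have hadd : PySem.Set.add (c :: s) x = c :: PySem.Set.add s x := by
      have hxcb : (x == c) = false := beq_eq_false_iff_ne.mpr hxc
      simp only [PySem.Set.add, PySem.Set.contains, List.contains_cons, hxcb, Bool.false_or]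
      split_ifs <;> simp
    simp only [List.foldl_cons, hadd]
    exact ih _ (fun h => hc (List.mem_cons_of_mem x h))

lemma pvOfListGroup {α : Type} [BEq α] [LawfulBEq α] (c : α) (t d : List α)
    (ht : ∀ x ∈ t, x = c) (hd : c ∉ d) :
    PySem.Set.ofList (c :: (t ++ d)) = c :: PySem.Set.ofList d := by
  show List.foldl PySem.Set.add PySem.Set.empty (c :: (t ++ d)) = _
  simp only [List.foldl_cons, List.foldl_append]
  have h0 : PySem.Set.add PySem.Set.empty c = [c] := by
    simp [PySem.Set.add, PySem.Set.empty, PySem.Set.contains]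
  rw [h0]
  have h1 : t.foldl PySem.Set.add [c] = [c] := by
    apply pvFoldlAddFixed
    intro x hx
    simp [ht x hx]
  rw [h1]
  exact pvFoldlAddCons d c [] hd

lemma pvOfListMap {α β : Type} [BEq α] [LawfulBEq α] [BEq β] [LawfulBEq β]
    (f : α → β) (hf : Function.Injective f) (l : List α) :
    PySem.Set.ofList (l.map f) = (PySem.Set.ofList l).map f := by
  suffices h : ∀ acc : List α, (l.map f).foldl PySem.Set.add (acc.map f)
      = (l.foldl PySem.Set.add acc).map f by
    simpa using h []
  induction l with
  | nil => intro acc; rfl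
  | cons x l ih =>
    intro acc
    have hstep : PySem.Set.add (acc.map f) (f x) = (PySem.Set.add acc x).map f := by
      by_cases hx : x ∈ acc
      · have h1 : f x ∈ acc.map f := List.mem_map_of_mem hx
        simp [PySem.Set.add, PySem.Set.contains, hx, h1]
      · have h1 : f x ∉ acc.map f := by
          intro hmem
          rcases List.mem_map.mp hmem with ⟨a, ha, hfa⟩
          exact hx (hf hfa ▸ ha)
        simp [PySem.Set.add, PySem.Set.contains, hx, h1]
    simp only [List.map_cons, List.foldl_cons, hstep]
    exact ih (PySem.Set.add acc x)

lemma pvOfListSublist {α : Type} [BEq α] (l : List α) :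
    (PySem.Set.ofList l).Sublist l := by
  suffices h : ∀ acc : List α, (l.foldl PySem.Set.add acc).Sublist (acc ++ l) by
    simpa using h []
  induction l with
  | nil => intro acc; simp
  | cons x l ih =>
    intro acc
    simp only [List.foldl_cons]
    by_cases hx : acc.contains x = true
    · have : PySem.Set.add acc x = acc := by simp [PySem.Set.add, PySem.Set.contains, hx]
      rw [this]
      exact (ih acc).trans (List.Sublist.append_left (List.sublist_cons_self x l) acc)
    · have : PySem.Set.add acc x = acc ++ [x] := by
        simp only [Bool.not_eq_true] at hx
        simp [PySem.Set.add, PySem.Set.contains, hx]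
      rw [this]
      have := ih (acc ++ [x])
      simpa using this
lemma pvOfListPairwiseLt (S : List Char) (hs : S.Pairwise (· ≤ ·)) :
    (PySem.Set.ofList S).Pairwise (· < ·) := by
  have hle : (PySem.Set.ofList S).Pairwise (· ≤ ·) := hs.sublist (pvOfListSublist S)
  have hne : (PySem.Set.ofList S).Pairwise (· ≠ ·) := PySem.Set.nodup_ofList S
  exact (hle.and hne).imp (fun h => lt_of_le_of_ne h.1 h.2)

-- B-side characterisation: on a ≤-sorted list, the run scanner produces
-- (first occurrences, multiplicities)
lemma pvGroupEq (S : List Char) (hs : S.Pairwise (· ≤ ·)) :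
    pvGroup S = (PySem.Set.ofList S).map (fun c => (String.ofList [c], (S.count c : Int))) := by
  induction S using pvGroup.induct with
  | case1 => simp [pvGroup]
  | case2 c rest ih =>
    have hsplit : rest.takeWhile (fun x => x == c) ++ rest.dropWhile (fun x => x == c) = rest :=
      List.takeWhile_append_dropWhile
    set t := rest.takeWhile (fun x => x == c) with ht
    set d := rest.dropWhile (fun x => x == c) with hd
    have htc : ∀ x ∈ t, x = c := by
      intro x hx
      have := List.mem_takeWhile_imp hx
      simpa using this
    have hrest : rest.Pairwise (· ≤ ·) := (List.pairwise_cons.mp hs).2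
    have hcle : ∀ x ∈ rest, c ≤ x := (List.pairwise_cons.mp hs).1
    have hdpw : d.Pairwise (· ≤ ·) := hrest.sublist (List.dropWhile_sublist _)
    have hcd : c ∉ d := by
      intro hmem
      cases hde : d with
      | nil => rw [hde] at hmem; simp at hmem
      | cons h d' =>
        have hhne : h ≠ c := by
          have := List.head?_dropWhile_not (fun x => x == c) rest
          rw [← hd, hde] at this
          simpa using this
        have hch : c ≤ h := hcle h (by rw [← hsplit, hde]; simp)
        rw [hde] at hmem
        rcases List.mem_cons.mp hmem with h1 | h1
        · exact hhne h1.symm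
        · have hhc : h ≤ c := by
            rw [hde] at hdpw
            exact (List.pairwise_cons.mp hdpw).1 c h1
          exact hhne (le_antisymm hhc hch)
    have hcount_c : ((c :: rest).count c : Int) = 1 + (t.length : Int) := by
      have h1 : (c :: rest).count c = rest.count c + 1 := by simp
      have h2 : rest.count c = t.count c + d.count c := by
        rw [← hsplit, List.count_append]
      have h3 : t.count c = t.length := by
        rw [List.count_eq_length]
        intro b hb
        simp [htc b hb]
      have h4 : d.count c = 0 := List.count_eq_zero.mpr hcd
      omega
    have hset : PySem.Set.ofList (c :: rest) = c :: PySem.Set.ofList d := by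
      rw [← hsplit]
      exact pvOfListGroup c t d htc hcd
    have hcnt : ∀ k ∈ PySem.Set.ofList d, (c :: rest).count k = d.count k := by
      intro k hk
      have hkd : k ∈ d := (PySem.Set.mem_ofList d k).mp hk
      have hkc : k ≠ c := fun h => hcd (h ▸ hkd)
      have hkt : k ∉ t := fun h => hkc (htc k h)
      have h5 : List.count k t = 0 := List.count_eq_zero.mpr hkt
      have hck : c ≠ k := Ne.symm hkc
      rw [← hsplit]
      simp [List.count_append, h5, hck]
    simp only [pvGroup, ← ht, ← hd]
    rw [ih hdpw, hset]
    simp only [List.map_cons, hcount_c]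
    congr 1
    apply List.map_congr_left
    intro k hk
    rw [hcnt k hk]

-- A-side: the counting loop is Counter over the filtered, key-mapped characters
lemma pvLoopEq (data : String) :
    data.toList.foldl (fun d c =>
      if PySem.Chars.strIsalpha [c] then
        let k := String.ofList [c]
        if d.contains k then d.insert k (d.getD k 0 + 1) else d.insert k 1
      else d) PySem.Dict.empty
    = PySem.Dict.counter ((data.toList.filter (fun c => PySem.Chars.strIsalpha [c])).map
        (fun c => String.ofList [c])) := by
  have hstep : (fun (d : PySem.Dict String Int) (c : Char) =>
      if PySem.Chars.strIsalpha [c] then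
        let k := String.ofList [c]
        if d.contains k then d.insert k (d.getD k 0 + 1) else d.insert k 1
      else d)
      = fun d c => if PySem.Chars.strIsalpha [c] then
          d.insert (String.ofList [c]) (d.getD (String.ofList [c]) 0 + 1) else d := by
    funext d c
    by_cases ha : PySem.Chars.strIsalpha [c]
    · simp only [ha, if_true]
      by_cases hc : d.contains (String.ofList [c]) = true
      · simp [hc]
      · simp only [Bool.not_eq_true] at hc
        simp [hc, PySem.Dict.getD_of_not_contains d 0 hc]
    · simp [ha]
  rw [hstep, PySem.List.foldl_if_eq_foldl_filter, ← PySem.Dict.foldl_insert_getD_add_one_eq_counter,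
    List.foldl_map]

-- ===== VERDICT (by name: the statement is the Claim_ definition above) =====
theorem count_alphabet_py_spec : Claim_equal_count_alphabet_py := by
  intro data _
  show count_alphabet_py data = count_alphabet_py_alt data
  unfold count_alphabet_py count_alphabet_py_alt
  set L := data.toList.filter (fun c => PySem.Chars.strIsalpha [c]) with hL
  set S := PySem.List.sorted L (fun c => c) with hS
  have hSperm : S.Perm L := PySem.List.sorted_perm L (fun c => c) false
  have hSsort : S.Pairwise (· ≤ ·) := PySem.List.sorted_pairwise L (fun c => c)
  rw [pvLoopEq data, ← hL]
  show PySem.List.sorted2 (PySem.Dict.counter (L.map (fun c => String.ofList [c]))).items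
    Prod.fst Prod.snd = pvGroup S
  rw [PySem.Dict.items_counter]
  rw [pvGroupEq S hSsort]
  apply pvSorted2Eq
  · -- permutation
    have hof : PySem.Set.ofList (L.map (fun c => String.ofList [c]))
        = (PySem.Set.ofList L).map (fun c => String.ofList [c]) := pvOfListMap _ pvMkInj L
    rw [hof, List.map_map]
    have hperm : (PySem.Set.ofList S).Perm (PySem.Set.ofList L) := by
      rw [List.perm_ext_iff_of_nodup (PySem.Set.nodup_ofList S) (PySem.Set.nodup_ofList L)]
      intro a
      rw [PySem.Set.mem_ofList, PySem.Set.mem_ofList]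
      exact ⟨fun h => hSperm.mem_iff.mp h, fun h => hSperm.mem_iff.mpr h⟩
    have hfun : ∀ c ∈ PySem.Set.ofList S,
        (fun c => (String.ofList [c], (S.count c : Int))) c
        = ((fun k => (k, ((L.map (fun c => String.ofList [c])).count k : Int))) ∘
            fun c => String.ofList [c]) c := by
      intro c _
      simp only [Function.comp_apply]
      rw [List.count_map_of_injective L _ pvMkInj, hSperm.count_eq]
    rw [List.map_congr_left hfun]
    exact (hperm.map _)
  · -- strictly increasing keys
    have hlt : (PySem.Set.ofList S).Pairwise (· < ·) := pvOfListPairwiseLt S hSsort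
    exact hlt.map _ (fun {a b} h => pvMkLt h)
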